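-- pv_equiv track=rewrite | github.com/bben15600-sys/ben-automation-system | scripts/weekly_planner_bot.py | kb_choice
-- ===== SOURCE A (Python) =====
-- def kb_choice(options: list) -> list:
--     """options = list of (label, value)"""
--     rows, row = [], []
--     for label, value in options:
--         row.append({"text": label, "callback_data": f"c:{value}"})
--         if len(row) == 2:
--             rows.append(row)
--             row = []
--     if row:
--         rows.append(row)
--     return rows
-- ===== SOURCE B (Python) =====
-- def kb_choice(options: list) -> list:
--     """options = list of (label, value)"""
--     return [
--         [{"text": label, "callback_data": f"c:{value}"} for label, value in options[i:i + 2]]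
--         for i in range(0, len(options), 2)
--     ]
-- ===== Notes on version B (the rewrite author's own statement) =====
-- stated objective: idiomatic
-- what changed: Replaces the running row buffer with length-2 flush checks by a stride-2 range over indices that slices each pair directly; the trailing short slice handles an odd element with no final 'if row' fixup.
import Mathlib
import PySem

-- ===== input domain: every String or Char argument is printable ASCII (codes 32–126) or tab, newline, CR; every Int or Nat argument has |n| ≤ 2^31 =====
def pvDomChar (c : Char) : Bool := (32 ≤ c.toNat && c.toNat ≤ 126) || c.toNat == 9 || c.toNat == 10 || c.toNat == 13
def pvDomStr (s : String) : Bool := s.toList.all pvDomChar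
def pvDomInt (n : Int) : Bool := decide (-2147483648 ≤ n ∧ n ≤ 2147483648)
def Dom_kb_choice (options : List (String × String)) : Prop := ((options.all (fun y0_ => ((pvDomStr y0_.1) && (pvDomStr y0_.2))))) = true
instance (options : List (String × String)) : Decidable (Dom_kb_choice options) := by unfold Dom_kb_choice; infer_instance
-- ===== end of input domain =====

-- B replaces A's running row buffer with its length-2 flush check by a stride-2 index range slicing each pair directly (idiomatic; same O(n) cost).

-- ===== PORT A =====
-- the button dict {"text": label, "callback_data": "c:" + value} as an association list (shared literal of both programs)
def pvBtn (o : String × String) : List (String × String) :=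
  [("text", o.1), ("callback_data", "c:" ++ o.2)]

def kb_choice (options : List (String × String)) : List (List (List (String × String))) :=
  let st := options.foldl
    (fun (st : List (List (List (String × String))) × List (List (String × String))) o =>
      let row' := st.2 ++ [pvBtn o]
      if row'.length = 2 then (st.1 ++ [row'], []) else (st.1, row'))
    ([], [])
  if st.2.isEmpty then st.1 else st.1 ++ [st.2]

-- ===== PORT B =====
def kb_choice_alt (options : List (String × String)) : List (List (List (String × String))) :=
  (PySem.List.pyRange 0 (options.length : Int) 2).map
    (fun i => (PySem.List.slice options (some i) (some (i + 2))).map pvBtn)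

-- ===== PRECONDITION & SPEC =====
def Spec_kb_choice (options : List (String × String)) (out : List (List (List (String × String)))) : Prop := out = kb_choice_alt options
instance (options : List (String × String)) (out : List (List (List (String × String)))) : Decidable (Spec_kb_choice options out) := by unfold Spec_kb_choice; infer_instance

-- ===== CLAIM (what is proved, stated in full; the proofs are below) =====
def Claim_equal_kb_choice : Prop := ∀ (options : List (String × String)), Dom_kb_choice options → Spec_kb_choice options (kb_choice options)

-- ===== LEMMAS AND PROOFS =====

-- the stride-2 range peels its first index and shifts the rest by 2
lemma pvRange2_cons (n : Nat) :
    PySem.List.pyRange 0 ((n : Int) + 2) 2 = 0 :: (PySem.List.pyRange 0 (n : Int) 2).map (· + 2) := by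
  rw [PySem.List.pyRange_of_pos _ _ (by norm_num), PySem.List.pyRange_of_pos _ _ (by norm_num)]
  rcases Nat.eq_zero_or_pos n with h | h
  · subst h; norm_num
  · have h2 : (0 : Int) < n := by exact_mod_cast h
    have h1 : (0 : Int) < (n : Int) + 2 := by omega
    simp only [if_pos h1, if_pos h2]
    have e : (((n : Int) + 2 - 0 + 2 - 1) / 2).toNat = (((n : Int) - 0 + 2 - 1) / 2).toNat + 1 := by
      omega
    rw [e, List.range_succ_eq_map]
    simp only [List.map_cons, List.map_map]
    congr 1

lemma pvAlt_nil : kb_choice_alt [] = [] := by decide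

lemma pvAlt_single (x : String × String) : kb_choice_alt [x] = [[pvBtn x]] := by
  have hr : PySem.List.pyRange 0 (1 : Int) 2 = [0] := by decide
  simp [kb_choice_alt, hr, PySem.List.slice_toNat]

-- B consumes a pair at a time
lemma pvAlt_cons2 (x y : String × String) (rest : List (String × String)) :
    kb_choice_alt (x :: y :: rest) = [pvBtn x, pvBtn y] :: kb_choice_alt rest := by
  unfold kb_choice_alt
  have hl : (((x :: y :: rest).length : Nat) : Int) = ((rest.length : Int) + 2) := by
    simp; ring
  rw [hl, pvRange2_cons, List.map_cons, List.map_map]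
  congr 1
  apply List.map_congr_left
  intro i hi
  have hi0 : 0 ≤ i := by
    have := ((PySem.List.mem_pyRange_iff_of_pos (by norm_num : (0:Int) < 2)) i).mp hi
    omega
  simp only [Function.comp]
  rw [PySem.List.slice_toNat _ (by omega) (by omega), PySem.List.slice_toNat _ hi0 (by omega)]
  have h4 : (i + 2 + 2).toNat = i.toNat + 4 := by omega
  have h2 : (i + 2).toNat = i.toNat + 2 := by omega
  rw [h4, h2]
  simp

-- A's buffer-and-flush loop (started with an empty buffer and any accumulated rows) appends exactly B's rows
lemma pvLoop : ∀ (opts : List (String × String)) (rows : List (List (List (String × String)))),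
    (let st := opts.foldl
        (fun (st : List (List (List (String × String))) × List (List (String × String))) o =>
          let row' := st.2 ++ [pvBtn o]
          if row'.length = 2 then (st.1 ++ [row'], []) else (st.1, row'))
        (rows, [])
     if st.2.isEmpty then st.1 else st.1 ++ [st.2]) = rows ++ kb_choice_alt opts
  | [], rows => by simp [pvAlt_nil]
  | [x], rows => by simp [pvAlt_single]
  | x :: y :: rest, rows => by
      have ih := pvLoop rest (rows ++ [[pvBtn x, pvBtn y]])
      simp only [List.foldl_cons] at *
      norm_num at *
      rw [ih, pvAlt_cons2]

-- ===== VERDICT (by name: the statement is the Claim_ definition above) =====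
theorem kb_choice_spec : Claim_equal_kb_choice := by
  intro options _
  unfold Spec_kb_choice kb_choice
  simpa using pvLoop options []
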